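-- pv_equiv track=rewrite | github.com/dlario/PythonQT | PackageManager/Packages/ProgramBase/UI/Forms/PackageBuilder/PackageBuilder.py | findPinType
-- ===== SOURCE A (Python) =====
-- def findPinType(pinname):
--     pinTransDict2 = {"Execution": ["execpin", "exec", "execution", "exec"],
--                      "Anything": ["anypin", "anything", "any"],
--                      "Array": ["arraypin", "array", "arr"],
--                      "Boolean": ["boolpin", "boolean", "bool"],
--                      "Integer": ["intpin", "integer", "int"],
--                      "Float": ["floatpin", "float", "double", "number", "num", "real", "decimal", "doub", "numeric"],
--                      "String": ["stringpin", "string", "str"]}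
--
--     for pinType in pinTransDict2:
--         if pinname.lower() in pinTransDict2[pinType]:
--             return pinType
-- ===== SOURCE B (Python) =====
-- # Flat reverse-lookup table written out once: alias -> canonical pin type.
-- _ALIAS_TO_TYPE = {
--     "execpin": "Execution", "exec": "Execution", "execution": "Execution",
--     "anypin": "Anything", "anything": "Anything", "any": "Anything",
--     "arraypin": "Array", "array": "Array", "arr": "Array",
--     "boolpin": "Boolean", "boolean": "Boolean", "bool": "Boolean",
--     "intpin": "Integer", "integer": "Integer", "int": "Integer",
--     "floatpin": "Float", "float": "Float", "double": "Float",
--     "number": "Float", "num": "Float", "real": "Float",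
--     "decimal": "Float", "doub": "Float", "numeric": "Float",
--     "stringpin": "String", "string": "String", "str": "String",
-- }
--
-- def findPinType(pinname):
--     return _ALIAS_TO_TYPE.get(pinname.lower())
-- ===== Notes on version B (the rewrite author's own statement) =====
-- stated objective: idiomatic
-- what changed: Eliminates A's per-call loop over the type->aliases dict with inner list-membership tests; B uses a flat alias->type reverse-lookup dict literal and the body is a single .get, no loop.
import Mathlib
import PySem

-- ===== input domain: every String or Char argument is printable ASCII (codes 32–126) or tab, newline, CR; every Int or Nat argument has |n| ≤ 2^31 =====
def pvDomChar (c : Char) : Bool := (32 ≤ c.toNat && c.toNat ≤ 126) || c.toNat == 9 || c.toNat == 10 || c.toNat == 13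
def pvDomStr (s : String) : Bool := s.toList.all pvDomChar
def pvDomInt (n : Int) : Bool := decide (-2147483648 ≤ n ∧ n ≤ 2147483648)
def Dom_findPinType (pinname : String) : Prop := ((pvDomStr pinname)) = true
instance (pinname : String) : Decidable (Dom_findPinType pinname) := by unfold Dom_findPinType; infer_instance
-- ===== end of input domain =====

-- B replaces A's per-call loop over the type->aliases dict (with inner list-membership
-- tests) by a flat alias->type literal table; the body is a single first-match lookup.


-- ===== PORT A =====
-- the literal dict pinTransDict2 as an association list (insertion order)
def pinTransDict2 : List (String × List String) :=
  [("Execution", ["execpin", "exec", "execution", "exec"]),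
   ("Anything", ["anypin", "anything", "any"]),
   ("Array", ["arraypin", "array", "arr"]),
   ("Boolean", ["boolpin", "boolean", "bool"]),
   ("Integer", ["intpin", "integer", "int"]),
   ("Float", ["floatpin", "float", "double", "number", "num", "real", "decimal", "doub", "numeric"]),
   ("String", ["stringpin", "string", "str"])]

-- 'for pinType in pinTransDict2: if pinname.lower() in pinTransDict2[pinType]: return pinType'
def findPinTypeLoop (l : String) : List (String × List String) → Option String
  | [] => none
  | (t, as) :: rest => if as.contains l then some t else findPinTypeLoop l rest

def findPinType (pinname : String) : Option String :=
  findPinTypeLoop (PySem.Str.lower pinname) pinTransDict2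

-- ===== PORT B =====
-- _ALIAS_TO_TYPE: a flat dict literal alias -> type (keys are distinct, so the
-- first-match association-list lookup is exactly dict .get)
def aliasToType : List (String × String) :=
  [("execpin", "Execution"), ("exec", "Execution"), ("execution", "Execution"),
   ("anypin", "Anything"), ("anything", "Anything"), ("any", "Anything"),
   ("arraypin", "Array"), ("array", "Array"), ("arr", "Array"),
   ("boolpin", "Boolean"), ("boolean", "Boolean"), ("bool", "Boolean"),
   ("intpin", "Integer"), ("integer", "Integer"), ("int", "Integer"),
   ("floatpin", "Float"), ("float", "Float"), ("double", "Float"),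
   ("number", "Float"), ("num", "Float"), ("real", "Float"),
   ("decimal", "Float"), ("doub", "Float"), ("numeric", "Float"),
   ("stringpin", "String"), ("string", "String"), ("str", "String")]

def findPinType_alt (pinname : String) : Option String :=
  aliasToType.lookup (PySem.Str.lower pinname)

-- ===== PRECONDITION & SPEC =====
def Spec_findPinType (pinname : String) (out : Option String) : Prop := out = findPinType_alt pinname
instance (pinname : String) (out : Option String) : Decidable (Spec_findPinType pinname out) := by unfold Spec_findPinType; infer_instance

-- ===== CLAIM (what is proved, stated in full; the proofs are below) =====
def Claim_equal_findPinType : Prop := ∀ (pinname : String), Dom_findPinType pinname → Spec_findPinType pinname (findPinType pinname)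

-- ===== LEMMAS AND PROOFS =====
-- core lemma: for any (lowered) string l the loop over pinTransDict2 and the flat
-- reverse table agree — case split on whether l is one of the 27 alias literals
theorem loop_eq_lookup (l : String) :
    findPinTypeLoop l pinTransDict2 = aliasToType.lookup l := by
  by_cases h : l ∈ ["execpin", "exec", "execution", "anypin", "anything", "any",
                    "arraypin", "array", "arr", "boolpin", "boolean", "bool",
                    "intpin", "integer", "int", "floatpin", "float", "double",
                    "number", "num", "real", "decimal", "doub", "numeric",
                    "stringpin", "string", "str"]
  · fin_cases h <;>
      simp [findPinTypeLoop, pinTransDict2, aliasToType, List.lookup]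
  · simp only [List.mem_cons, List.not_mem_nil, or_false, not_or] at h
    obtain ⟨h1, h2, h3, h4, h5, h6, h7, h8, h9, h10, h11, h12, h13, h14, h15,
            h16, h17, h18, h19, h20, h21, h22, h23, h24, h25, h26, h27⟩ := h
    simp [findPinTypeLoop, pinTransDict2, aliasToType, List.lookup,
          h1, h2, h3, h4, h5, h6, h7, h8, h9, h10, h11, h12, h13, h14, h15,
          h16, h17, h18, h19, h20, h21, h22, h23, h24, h25, h26, h27,
          beq_eq_false_iff_ne.mpr h1,
          beq_eq_false_iff_ne.mpr h2,
          beq_eq_false_iff_ne.mpr h3,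
          beq_eq_false_iff_ne.mpr h4,
          beq_eq_false_iff_ne.mpr h5,
          beq_eq_false_iff_ne.mpr h6,
          beq_eq_false_iff_ne.mpr h7,
          beq_eq_false_iff_ne.mpr h8,
          beq_eq_false_iff_ne.mpr h9,
          beq_eq_false_iff_ne.mpr h10,
          beq_eq_false_iff_ne.mpr h11,
          beq_eq_false_iff_ne.mpr h12,
          beq_eq_false_iff_ne.mpr h13,
          beq_eq_false_iff_ne.mpr h14,
          beq_eq_false_iff_ne.mpr h15,
          beq_eq_false_iff_ne.mpr h16,
          beq_eq_false_iff_ne.mpr h17,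
          beq_eq_false_iff_ne.mpr h18,
          beq_eq_false_iff_ne.mpr h19,
          beq_eq_false_iff_ne.mpr h20,
          beq_eq_false_iff_ne.mpr h21,
          beq_eq_false_iff_ne.mpr h22,
          beq_eq_false_iff_ne.mpr h23,
          beq_eq_false_iff_ne.mpr h24,
          beq_eq_false_iff_ne.mpr h25,
          beq_eq_false_iff_ne.mpr h26,
          beq_eq_false_iff_ne.mpr h27]

-- ===== VERDICT (by name: the statement is the Claim_ definition above) =====
theorem findPinType_spec : Claim_equal_findPinType := by
  intro pinname _
  unfold Spec_findPinType findPinType findPinType_alt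
  exact loop_eq_lookup (PySem.Str.lower pinname)
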